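-- pv_equiv track=rewrite | github.com/juju288/SWP_RubnS | Pokerspiel.py | nOfAKind
-- ===== SOURCE A (Python) =====
-- def cardNumbers(arr):
--     out = []
--     for c in arr:
--         out.append(cardNumber(c))
--     return out
--
-- def cardNumber(arr):
--     if ((arr % 13) == 0):
--         return 2;
--     elif ((arr % 13) == 1):
--         return 3;
--     elif ((arr % 13) == 2):
--         return 4;
--     elif ((arr % 13) == 3):
--         return 5;
--     elif ((arr % 13) == 4):
--         return 6;
--     elif ((arr % 13) == 5):
--         return 7;
--     elif ((arr % 13) == 6):
--         return 8;
--     elif ((arr % 13) == 7):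
--         return 9;
--     elif ((arr % 13) == 8):
--         return 10;
--     elif ((arr % 13) == 9):
--         return 11;         #J
--     elif ((arr % 13) == 10):
--         return 12;         #Q
--     elif ((arr % 13) == 11):
--         return 13;         #K
--     elif ((arr % 13) == 12):
--         return 14;         #A
--
-- def nOfAKind(hand):
--     n = 1
--     rank = None
--     for i in range(0, len(hand)):
--         if cardNumber(hand[i]) in cardNumbers(hand[i + 1:]):
--             if rank is None:
--                 rank = cardNumber(hand[i])
--             if rank is cardNumber(hand[i]):
--                 n += 1
--     return n
-- ===== SOURCE B (Python) =====
-- def nOfAKind(hand):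
--     counts = {}
--     for c in hand:
--         r = c % 13 + 2
--         counts[r] = counts.get(r, 0) + 1
--     for r, cnt in counts.items():
--         if cnt >= 2:
--             return cnt
--     return 1
-- ===== Notes on version B (the rewrite author's own statement) =====
-- stated objective: faster
-- what changed: Replaces A's per-index scan of the remaining suffix (rebuilding cardNumbers(hand[i+1:]) at every position) by one counting pass into a dict keyed by rank in first-occurrence order, then a scan of the dict entries returning the count of the first rank occurring at least twice.
import Mathlib
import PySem

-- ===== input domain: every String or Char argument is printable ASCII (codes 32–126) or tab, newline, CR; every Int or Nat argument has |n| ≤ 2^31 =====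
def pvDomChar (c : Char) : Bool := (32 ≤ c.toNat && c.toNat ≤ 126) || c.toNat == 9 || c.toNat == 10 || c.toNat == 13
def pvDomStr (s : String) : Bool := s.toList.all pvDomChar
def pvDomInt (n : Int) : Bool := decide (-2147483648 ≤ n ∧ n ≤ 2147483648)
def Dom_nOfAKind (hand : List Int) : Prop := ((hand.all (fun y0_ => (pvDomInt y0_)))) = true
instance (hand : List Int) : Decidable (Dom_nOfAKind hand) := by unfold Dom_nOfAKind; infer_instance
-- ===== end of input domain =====

-- B replaces A's quadratic suffix re-scanning by one counting pass into a rank-keyed dict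
-- plus a scan of its entries (first-occurrence order) for the first rank with count ≥ 2.

-- ===== PORT A =====
-- cardNumber: Python's elif-chain on arr % 13 (floor mod, always in 0..12, so the final
-- elif is exhaustive; the trailing `else 14` is exactly that last elif's branch).
def cardNumber (arr : Int) : Int :=
  if PySem.Int.mod arr 13 = 0 then 2
  else if PySem.Int.mod arr 13 = 1 then 3
  else if PySem.Int.mod arr 13 = 2 then 4
  else if PySem.Int.mod arr 13 = 3 then 5
  else if PySem.Int.mod arr 13 = 4 then 6
  else if PySem.Int.mod arr 13 = 5 then 7
  else if PySem.Int.mod arr 13 = 6 then 8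
  else if PySem.Int.mod arr 13 = 7 then 9
  else if PySem.Int.mod arr 13 = 8 then 10
  else if PySem.Int.mod arr 13 = 9 then 11
  else if PySem.Int.mod arr 13 = 10 then 12
  else if PySem.Int.mod arr 13 = 11 then 13
  else 14

def cardNumbers (arr : List Int) : List Int :=
  arr.foldl (fun out c => out ++ [cardNumber c]) []

-- `rank is cardNumber(hand[i])` / `rank is None`: identity on CPython-cached small ints
-- 2..14 and on None, ported as equality / Option matching (exact here).
def nOfAKind (hand : List Int) : Int :=
  ((PySem.List.pyRange 0 (hand.length : Int) 1).foldl
    (fun (st : Int × Option Int) i =>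
      if cardNumber (PySem.List.pyGetD hand i 0) ∈
          cardNumbers (PySem.List.slice hand (some (i + 1)) none) then
        let rank : Option Int :=
          match st.2 with
          | none => some (cardNumber (PySem.List.pyGetD hand i 0))
          | some r => some r
        if rank = some (cardNumber (PySem.List.pyGetD hand i 0)) then (st.1 + 1, rank)
        else (st.1, rank)
      else st)
    (1, (none : Option Int))).1

-- ===== PORT B =====
-- the second loop of Source B: return the count of the first entry with cnt >= 2, else 1
def firstGe2 : List (Int × Int) → Int
  | [] => 1
  | (_, cnt) :: rest => if 2 ≤ cnt then cnt else firstGe2 rest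

def nOfAKind_alt (hand : List Int) : Int :=
  let counts : PySem.Dict Int Int :=
    hand.foldl
      (fun d c =>
        let r := PySem.Int.mod c 13 + 2
        d.insert r (d.getD r 0 + 1))
      PySem.Dict.empty
  firstGe2 counts.items

-- ===== PRECONDITION & SPEC =====
def Spec_nOfAKind (hand : List Int) (out : Int) : Prop := out = nOfAKind_alt hand
instance (hand : List Int) (out : Int) : Decidable (Spec_nOfAKind hand out) := by unfold Spec_nOfAKind; infer_instance

-- ===== CLAIM (what is proved, stated in full; the proofs are below) =====
def Claim_equal_nOfAKind : Prop := ∀ (hand : List Int), Dom_nOfAKind hand → Spec_nOfAKind hand (nOfAKind hand)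

-- ===== LEMMAS AND PROOFS =====

def rankF (c : Int) : Int := PySem.Int.mod c 13 + 2

theorem rank_chain_eq (m : Int) (h0 : 0 ≤ m) (h1 : m < 13) :
    (if m = 0 then (2 : Int) else if m = 1 then 3 else if m = 2 then 4 else if m = 3 then 5
     else if m = 4 then 6 else if m = 5 then 7 else if m = 6 then 8 else if m = 7 then 9
     else if m = 8 then 10 else if m = 9 then 11 else if m = 10 then 12 else if m = 11 then 13
     else 14) = m + 2 := by
  interval_cases m <;> norm_num

theorem cardNumber_eq_rankF (c : Int) : cardNumber c = rankF c :=
  rank_chain_eq (PySem.Int.mod c 13) (PySem.Int.mod_nonneg c (by norm_num))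
    (PySem.Int.mod_lt c (by norm_num))

theorem cardNumbers_eq_map (arr : List Int) : cardNumbers arr = arr.map cardNumber := by
  unfold cardNumbers
  simpa using PySem.List.foldl_append_singleton_eq_map cardNumber arr []

-- structural form of A's loop, over the rank images
def loopR : List Int → Int → Option Int → Int
  | [], n, _ => n
  | r :: rest, n, none =>
    if r ∈ rest then loopR rest (n + 1) (some r) else loopR rest n none
  | r :: rest, n, some r0 =>
    if r ∈ rest then
      (if r0 = r then loopR rest (n + 1) (some r0) else loopR rest n (some r0))
    else loopR rest n (some r0)

-- A's loop body as a function of the index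
def stepA (hand : List Int) (st : Int × Option Int) (i : Int) : Int × Option Int :=
  if cardNumber (PySem.List.pyGetD hand i 0) ∈
      cardNumbers (PySem.List.slice hand (some (i + 1)) none) then
    let rank : Option Int :=
      match st.2 with
      | none => some (cardNumber (PySem.List.pyGetD hand i 0))
      | some r => some r
    if rank = some (cardNumber (PySem.List.pyGetD hand i 0)) then (st.1 + 1, rank)
    else (st.1, rank)
  else st

-- A's loop as structural recursion over the suffix of the hand
def loopH : List Int → Int × Option Int → Int × Option Int
  | [], st => st
  | c :: rest, st =>
    loopH rest
      (if cardNumber c ∈ cardNumbers rest then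
        let rank : Option Int :=
          match st.2 with
          | none => some (cardNumber c)
          | some r => some r
        if rank = some (cardNumber c) then (st.1 + 1, rank) else (st.1, rank)
      else st)

theorem bridge (hand : List Int) (k : Nat) :
    ∀ (a : Nat) (st : Int × Option Int), hand.length - a = k →
      (PySem.List.pyRange (a : Int) (hand.length : Int) 1).foldl (stepA hand) st
        = loopH (hand.drop a) st := by
  induction k with
  | zero =>
    intro a st hk
    have hle : hand.length ≤ a := by omega
    rw [PySem.List.pyRange_one_eq_nil (by exact_mod_cast hle)]
    rw [List.drop_eq_nil_of_le hle]
    rfl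
  | succ k ih =>
    intro a st hk
    have hlt : a < hand.length := by omega
    rw [PySem.List.pyRange_one_cons (by exact_mod_cast hlt)]
    rw [List.foldl_cons]
    have hdrop : hand.drop a = hand[a] :: hand.drop (a + 1) :=
      List.drop_eq_getElem_cons hlt
    have hget : PySem.List.pyGetD hand (a : Int) 0 = hand[a] := by
      rw [PySem.List.pyGetD_natCast]
      simp [List.getD, hlt]
    have hslice : PySem.List.slice hand (some ((a : Int) + 1)) none = hand.drop (a + 1) := by
      have : ((a : Int) + 1) = ((a + 1 : Nat) : Int) := by push_cast; ring
      rw [this, PySem.List.slice_from_natCast]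
    have hcast : ((a : Int) + 1) = ((a + 1 : Nat) : Int) := by push_cast; ring
    rw [hcast, ih (a + 1) _ (by omega), hdrop]
    simp only [loopH]
    unfold stepA
    rw [hget, hslice]

theorem loopH_eq_loopR (hand : List Int) :
    ∀ (n : Int) (rk : Option Int), (loopH hand (n, rk)).1 = loopR (hand.map rankF) n rk := by
  induction hand with
  | nil => intro n rk; rfl
  | cons c rest ih =>
    intro n rk
    have hmc : cardNumbers rest = rest.map rankF := by
      rw [cardNumbers_eq_map]
      exact List.map_congr_left (fun x _ => cardNumber_eq_rankF x)
    cases rk with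
    | none =>
      by_cases hc : rankF c ∈ rest.map rankF
      · have hL : loopH (c :: rest) (n, none) = loopH rest (n + 1, some (rankF c)) := by
          simp [loopH, hmc, cardNumber_eq_rankF, hc]
        rw [hL, List.map_cons]
        have hR : loopR (rankF c :: rest.map rankF) n none
            = loopR (rest.map rankF) (n + 1) (some (rankF c)) := by
          simp [loopR, hc]
        rw [hR]
        exact ih (n + 1) (some (rankF c))
      · have hL : loopH (c :: rest) (n, none) = loopH rest (n, none) := by
          simp [loopH, hmc, cardNumber_eq_rankF, hc]
        rw [hL, List.map_cons]
        have hR : loopR (rankF c :: rest.map rankF) n none = loopR (rest.map rankF) n none := by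
          simp [loopR, hc]
        rw [hR]
        exact ih n none
    | some r0 =>
      by_cases hc : rankF c ∈ rest.map rankF
      · by_cases hr : r0 = rankF c
        · have hL : loopH (c :: rest) (n, some r0) = loopH rest (n + 1, some r0) := by
            simp [loopH, hmc, cardNumber_eq_rankF, hc, hr]
          rw [hL, List.map_cons]
          have hR : loopR (rankF c :: rest.map rankF) n (some r0)
              = loopR (rest.map rankF) (n + 1) (some r0) := by
            simp [loopR, hc, hr]
          rw [hR]
          exact ih (n + 1) (some r0)
        · have hL : loopH (c :: rest) (n, some r0) = loopH rest (n, some r0) := by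
            simp [loopH, hmc, cardNumber_eq_rankF, hc, hr]
          rw [hL, List.map_cons]
          have hR : loopR (rankF c :: rest.map rankF) n (some r0)
              = loopR (rest.map rankF) n (some r0) := by
            simp [loopR, hc, hr]
          rw [hR]
          exact ih n (some r0)
      · have hL : loopH (c :: rest) (n, some r0) = loopH rest (n, some r0) := by
          simp [loopH, hmc, cardNumber_eq_rankF, hc]
        rw [hL, List.map_cons]
        have hR : loopR (rankF c :: rest.map rankF) n (some r0)
            = loopR (rest.map rankF) n (some r0) := by
          simp [loopR, hc]
        rw [hR]
        exact ih n (some r0)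

theorem nOfAKind_eq_loopR (hand : List Int) :
    nOfAKind hand = loopR (hand.map rankF) 1 none := by
  have hb := bridge hand hand.length 0 (1, (none : Option Int)) (by omega)
  rw [List.drop_zero] at hb
  simp only [Nat.cast_zero] at hb
  have hshow : nOfAKind hand
      = ((PySem.List.pyRange 0 (hand.length : Int) 1).foldl (stepA hand) (1, none)).1 := rfl
  rw [hshow, hb]
  exact loopH_eq_loopR hand 1 none

theorem loopR_some (xs : List Int) (r : Int) (n : Int) :
    loopR xs n (some r) = if r ∈ xs then n + (xs.count r : Int) - 1 else n := by
  induction xs generalizing n with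
  | nil => simp [loopR]
  | cons c rest ih =>
    by_cases hrc : r = c
    · subst hrc
      by_cases hm : r ∈ rest
      · simp [loopR, hm, ih]
        have : 1 ≤ rest.count r := List.count_pos_iff.mpr hm
        omega
      · have h0 : rest.count r = 0 := List.count_eq_zero_of_not_mem hm
        simp [loopR, hm, ih, h0]
    · have hmem : r ∈ c :: rest ↔ r ∈ rest := by
        simp [List.mem_cons, hrc]
      by_cases hc : c ∈ rest <;>
        simp [loopR, hc, ih, hmem, Ne.symm hrc, hrc]

theorem loopR_none_eq (rs : List Int) :
    loopR rs 1 none =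
      firstGe2 ((PySem.Set.ofList rs).map (fun k => (k, (rs.count k : Int)))) := by
  induction rs with
  | nil => simp [loopR, PySem.Set.ofList_nil, firstGe2]
  | cons r rest ih =>
    rw [PySem.Set.ofList_cons]
    by_cases hm : r ∈ rest
    · have hc : 1 ≤ rest.count r := List.count_pos_iff.mpr hm
      have hcnt : ((r :: rest).count r : Int) = (rest.count r : Int) + 1 := by
        simp
      simp only [loopR, if_pos hm, List.map_cons, firstGe2, hcnt]
      rw [if_pos (by omega), loopR_some, if_pos hm]
      omega
    · have hnotof : r ∉ PySem.Set.ofList rest := by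
        simp [PySem.Set.mem_ofList, hm]
      have hdisc : PySem.Set.discard (PySem.Set.ofList rest) r = PySem.Set.ofList rest := by
        unfold PySem.Set.discard
        apply List.filter_eq_self.mpr
        intro a ha
        have har : a ≠ r := fun h => hnotof (h ▸ ha)
        simp [har]
      have hcnt1 : ((r :: rest).count r : Int) = 1 := by
        simp [List.count_eq_zero_of_not_mem hm]
      simp only [loopR, if_neg hm, List.map_cons, firstGe2, hcnt1, hdisc]
      rw [if_neg (by norm_num)]
      rw [ih]
      congr 1
      apply List.map_congr_left
      intro k hk
      have hkr : k ≠ r := fun h => hm (h ▸ ((PySem.Set.mem_ofList rest k).mp hk))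
      simp [Ne.symm hkr]

theorem alt_eq_firstGe2 (hand : List Int) :
    nOfAKind_alt hand =
      firstGe2 ((PySem.Set.ofList (hand.map rankF)).map
        (fun k => (k, ((hand.map rankF).count k : Int)))) := by
  unfold nOfAKind_alt
  have hfold :
      hand.foldl
        (fun (d : PySem.Dict Int Int) c =>
          let r := PySem.Int.mod c 13 + 2
          d.insert r (d.getD r 0 + 1))
        PySem.Dict.empty
      = PySem.Dict.counter (hand.map rankF) := by
    rw [← PySem.Dict.foldl_insert_getD_add_one_eq_counter, List.foldl_map]
    rfl
  simp only [hfold, PySem.Dict.items_counter]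

-- ===== VERDICT (by name: the statement is the Claim_ definition above) =====
theorem nOfAKind_spec : Claim_equal_nOfAKind := by
  intro hand _
  unfold Spec_nOfAKind
  rw [nOfAKind_eq_loopR, loopR_none_eq, alt_eq_firstGe2]
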